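-- pv_equiv track=rewrite | github.com/pypi-data/pypi-mirror-390 | packages/todozi/todozi-0.1.6-py3-none-any.whl/todozi/todozi.py | transform_shorthand_tags
-- ===== SOURCE A (Python) =====
-- def transform_shorthand_tags(message: str) -> str:
--     transformed = message
--     mappings = [
--         ("<tz>", "<todozi>"), ("</tz>", "</todozi>"), ("<mm>", "<memory>"), ("</mm>", "</memory>"),
--         ("<id>", "<idea>"), ("</id>", "</idea>"), ("<ch>", "<chunk>"), ("</ch>", "</chunk>"),
--         ("<fe>", "<feel>"), ("</fe>", "</feel>"), ("<tn>", "<train>"), ("</tn>", "</train>"),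
--         ("<er>", "<error>"), ("</er>", "</error>"), ("<sm>", "<summary>"), ("</sm>", "</summary>"),
--         ("<rd>", "<reminder>"), ("</rd>", "</reminder>"), ("<tdz>", "<tdz>"), ("</tdz>", "</tdz>"),
--     ]
--     for shorthand, longhand in mappings:
--         transformed = transformed.replace(shorthand, longhand)
--     return transformed
-- ===== SOURCE B (Python) =====
-- # Single left-to-right scan: at each position emit the longhand of the first
-- # matching shorthand tag (the two identity <tdz> entries are dropped), instead
-- # of 20 sequential full-string replace passes.
-- RULES = [
--     ("<tz>", "<todozi>"), ("</tz>", "</todozi>"), ("<mm>", "<memory>"), ("</mm>", "</memory>"),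
--     ("<id>", "<idea>"), ("</id>", "</idea>"), ("<ch>", "<chunk>"), ("</ch>", "</chunk>"),
--     ("<fe>", "<feel>"), ("</fe>", "</feel>"), ("<tn>", "<train>"), ("</tn>", "</train>"),
--     ("<er>", "<error>"), ("</er>", "</error>"), ("<sm>", "<summary>"), ("</sm>", "</summary>"),
--     ("<rd>", "<reminder>"), ("</rd>", "</reminder>"),
-- ]
--
-- def transform_shorthand_tags(message: str) -> str:
--     out = []
--     i = 0
--     n = len(message)
--     while i < n:
--         for shorthand, longhand in RULES:
--             if message.startswith(shorthand, i):
--                 out.append(longhand)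
--                 i += len(shorthand)
--                 break
--         else:
--             out.append(message[i])
--             i += 1
--     return "".join(out)
-- ===== Notes on version B (the rewrite author's own statement) =====
-- stated objective: alternative
-- what changed: Replaces 20 sequential full-string .replace passes with one left-to-right scan that emits the longhand of the first shorthand tag matching at each position (the two identity <tdz> mappings are dropped).
import Mathlib
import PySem

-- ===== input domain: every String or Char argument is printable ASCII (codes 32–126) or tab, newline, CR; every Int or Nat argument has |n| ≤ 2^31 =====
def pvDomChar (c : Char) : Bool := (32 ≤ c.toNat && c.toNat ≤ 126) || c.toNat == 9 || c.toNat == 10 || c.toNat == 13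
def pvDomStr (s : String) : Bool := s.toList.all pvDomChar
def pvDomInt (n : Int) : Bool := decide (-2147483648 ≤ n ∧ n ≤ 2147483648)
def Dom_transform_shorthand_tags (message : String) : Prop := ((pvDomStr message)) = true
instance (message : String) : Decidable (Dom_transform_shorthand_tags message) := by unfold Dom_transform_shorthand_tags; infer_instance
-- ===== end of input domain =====

-- B replaces A's 20 sequential full-string replace passes with one left-to-right
-- scan that emits the longhand of the first shorthand tag matching at each position.


-- ===== PORT A =====
-- A's list of (shorthand, longhand) pairs, in source order
def pvMappings : List (String × String) :=
  [("<tz>", "<todozi>"), ("</tz>", "</todozi>"), ("<mm>", "<memory>"), ("</mm>", "</memory>"),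
   ("<id>", "<idea>"), ("</id>", "</idea>"), ("<ch>", "<chunk>"), ("</ch>", "</chunk>"),
   ("<fe>", "<feel>"), ("</fe>", "</feel>"), ("<tn>", "<train>"), ("</tn>", "</train>"),
   ("<er>", "<error>"), ("</er>", "</error>"), ("<sm>", "<summary>"), ("</sm>", "</summary>"),
   ("<rd>", "<reminder>"), ("</rd>", "</reminder>"), ("<tdz>", "<tdz>"), ("</tdz>", "</tdz>")]

def transform_shorthand_tags (message : String) : String :=
  pvMappings.foldl (fun transformed m => PySem.Str.replace transformed m.1 m.2) message

-- ===== PORT B =====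
-- Source B's RULES list (the two identity <tdz> entries dropped), as char lists
def pvRules : List (List Char × List Char) :=
  [("<tz>".toList, "<todozi>".toList), ("</tz>".toList, "</todozi>".toList),
   ("<mm>".toList, "<memory>".toList), ("</mm>".toList, "</memory>".toList),
   ("<id>".toList, "<idea>".toList), ("</id>".toList, "</idea>".toList),
   ("<ch>".toList, "<chunk>".toList), ("</ch>".toList, "</chunk>".toList),
   ("<fe>".toList, "<feel>".toList), ("</fe>".toList, "</feel>".toList),
   ("<tn>".toList, "<train>".toList), ("</tn>".toList, "</train>".toList),
   ("<er>".toList, "<error>".toList), ("</er>".toList, "</error>".toList),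
   ("<sm>".toList, "<summary>".toList), ("</sm>".toList, "</summary>".toList),
   ("<rd>".toList, "<reminder>".toList), ("</rd>".toList, "</reminder>".toList)]

-- Source B's while loop: the for/else picks the FIRST rule whose shorthand starts at the
-- current position (find?); on a match it emits the longhand and advances by
-- len(shorthand) (every rule is a nonempty literal, so dropping (length-1) of the
-- tail is exactly that advance); otherwise it emits the character and advances by one.
def pvScan (rules : List (List Char × List Char)) : List Char → List Char
  | [] => []
  | c :: cs =>
    match rules.find? (fun q => q.1.isPrefixOf (c :: cs)) with
    | some (p, r) => r ++ pvScan rules (cs.drop (p.length - 1))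
    | none => c :: pvScan rules cs
termination_by s => s.length
decreasing_by
  · simp only [List.length_cons, List.length_drop]; omega
  · simp only [List.length_cons]; omega

def transform_shorthand_tags_alt (message : String) : String :=
  String.ofList (pvScan pvRules message.toList)

-- ===== PRECONDITION & SPEC =====
def Spec_transform_shorthand_tags (message : String) (out : String) : Prop := out = transform_shorthand_tags_alt message
instance (message : String) (out : String) : Decidable (Spec_transform_shorthand_tags message out) := by unfold Spec_transform_shorthand_tags; infer_instance

-- ===== CLAIM (what is proved, stated in full; the proofs are below) =====
def Claim_equal_transform_shorthand_tags : Prop := ∀ (message : String), Dom_transform_shorthand_tags message → Spec_transform_shorthand_tags message (transform_shorthand_tags message)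

-- ===== LEMMAS AND PROOFS =====

-- str.replace (nonempty pattern) as a structural left-to-right scan over List Char
def pvPass (p r : List Char) : List Char → List Char
  | [] => []
  | c :: cs => if p.isPrefixOf (c :: cs) then r ++ pvPass p r (cs.drop (p.length - 1)) else c :: pvPass p r cs
termination_by s => s.length
decreasing_by
  · simp only [List.length_cons, List.length_drop]; omega
  · simp only [List.length_cons]; omega

-- a tag literal: starts with '<' and has no further '<'
def pvTag (l : List Char) : Prop := l.head? = some '<' ∧ '<' ∉ l.tail

def pvTagB (l : List Char) : Bool := l.head? == some '<' && !(l.tail.contains '<')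

-- the (checkable) condition under which the passes of a rule list fuse into one scan
def pvFuseCondB : List (List Char × List Char) → List (List Char × List Char) → Bool
  | [], _ => true
  | (p, r) :: R', acc =>
      pvTagB p && pvTagB r &&
      (R' ++ acc).all (fun q => pvTagB q.1 && !(q.1.isPrefixOf r) && !(r.isPrefixOf q.1)) &&
      pvFuseCondB R' acc

-- sequential application of the passes of a rule list, first rule first (A's loop shape)
def pvChain : List (List Char × List Char) → List Char → List Char
  | [], s => s
  | (p, r) :: R, s => pvChain R (pvPass p r s)

theorem pvTagB_iff (l : List Char) : pvTagB l = true ↔ pvTag l := by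
  simp [pvTagB, pvTag]

theorem pvPass_nil (p r : List Char) : pvPass p r [] = [] := by rw [pvPass]

theorem pvPass_cons_pos (p r : List Char) (c : Char) (cs : List Char)
    (h : p.isPrefixOf (c :: cs) = true) :
    pvPass p r (c :: cs) = r ++ pvPass p r (cs.drop (p.length - 1)) := by
  rw [pvPass]; simp [h]

theorem pvPass_cons_neg (p r : List Char) (c : Char) (cs : List Char)
    (h : ¬ p.isPrefixOf (c :: cs) = true) :
    pvPass p r (c :: cs) = c :: pvPass p r cs := by
  rw [pvPass]; simp [h]

theorem pvScan_nilArg (R : List (List Char × List Char)) : pvScan R [] = [] := by rw [pvScan]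

theorem pvScan_cons_some (R : List (List Char × List Char)) (c : Char) (cs p r : List Char)
    (h : R.find? (fun q => q.1.isPrefixOf (c :: cs)) = some (p, r)) :
    pvScan R (c :: cs) = r ++ pvScan R (cs.drop (p.length - 1)) := by
  rw [pvScan, h]

theorem pvScan_cons_none (R : List (List Char × List Char)) (c : Char) (cs : List Char)
    (h : R.find? (fun q => q.1.isPrefixOf (c :: cs)) = none) :
    pvScan R (c :: cs) = c :: pvScan R cs := by
  rw [pvScan, h]

-- scanning with no rules copies the string
theorem pvScan_nil (s : List Char) : pvScan [] s = s := by
  induction s with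
  | nil => exact pvScan_nilArg []
  | cons c cs ih => rw [pvScan_cons_none [] c cs (by simp), ih]

-- PySem.Chars.replace with a nonempty pattern is pvPass
theorem replace_go_eq (old new : List Char) (hold : old ≠ []) :
    ∀ fuel l acc, l.length ≤ fuel →
      PySem.Chars.replace.go old new fuel l acc = acc.reverse ++ pvPass old new l := by
  intro fuel
  induction fuel with
  | zero =>
    intro l acc hl
    have : l = [] := List.length_eq_zero_iff.mp (Nat.le_zero.mp hl)
    subst this
    simp [PySem.Chars.replace.go, pvPass_nil]
  | succ n ih =>
    intro l acc hl
    match l with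
    | [] => simp [PySem.Chars.replace.go, pvPass_nil]
    | c :: cs =>
      rw [PySem.Chars.replace.go]
      by_cases h : old.isPrefixOf (c :: cs) = true
      · rw [if_pos h, pvPass_cons_pos old new c cs h]
        have hd : (c :: cs).drop old.length = cs.drop (old.length - 1) := by
          match old, hold with
          | o :: os, _ => simp
        rw [hd, ih (cs.drop (old.length - 1)) (new.reverse ++ acc)
          (by simp only [List.length_drop]; simp only [List.length_cons] at hl; omega)]
        simp
      · rw [if_neg h, pvPass_cons_neg old new c cs h,
          ih cs (c :: acc) (by simp only [List.length_cons] at hl; omega)]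
        simp

theorem replace_cons_eq_pass (s : List Char) (c : Char) (ot new : List Char) :
    PySem.Chars.replace s (c :: ot) new = pvPass (c :: ot) new s := by
  rw [PySem.Chars.replace]
  simp only [List.isEmpty_cons, Bool.false_eq_true, if_false]
  exact (replace_go_eq (c :: ot) new (by simp) s.length s [] le_rfl).trans (by simp)

-- replacing a nonempty pattern by itself is the identity
theorem pvPass_id (c : Char) (pt : List Char) : ∀ s, pvPass (c :: pt) (c :: pt) s = s := by
  have key : ∀ n (s : List Char), s.length ≤ n → pvPass (c :: pt) (c :: pt) s = s := by
    intro n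
    induction n with
    | zero =>
      intro s hs
      have : s = [] := List.length_eq_zero_iff.mp (Nat.le_zero.mp hs)
      subst this; exact pvPass_nil _ _
    | succ n ih =>
      intro s hs
      match s with
      | [] => exact pvPass_nil _ _
      | d :: ds =>
        by_cases h : (c :: pt).isPrefixOf (d :: ds) = true
        · rw [pvPass_cons_pos _ _ _ _ h]
          obtain ⟨k, hk⟩ := List.isPrefixOf_iff_prefix.mp h
          simp only [List.cons_append, List.cons.injEq] at hk
          obtain ⟨hcd, hds⟩ := hk
          subst hcd
          rw [← hds]
          have hdrop : (pt ++ k).drop ((c :: pt).length - 1) = k := by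
            simp
          rw [hdrop, ih k (by
            simp only [List.length_cons] at hs
            have := congrArg List.length hds
            simp only [List.length_append] at this
            omega)]
          simp
        · rw [pvPass_cons_neg _ _ _ _ h,
            ih ds (by simp only [List.length_cons] at hs; omega)]
  exact fun s => key s.length s le_rfl

-- a pvPass leaves a '<'-free prefix of its input in place
theorem pvPass_clean_prefix (p r : List Char) (hp : p.head? = some '<') :
    ∀ u t, '<' ∉ u → u <+: t → pvPass p r t = u ++ pvPass p r (t.drop u.length) := by
  intro u
  induction u with
  | nil => intro t _ _; simp
  | cons x u' ih =>
    intro t hx hpre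
    rcases hpre with ⟨k, hk⟩
    subst hk
    have hnp : ¬ p.isPrefixOf (x :: (u' ++ k)) = true := by
      intro hc
      rcases List.isPrefixOf_iff_prefix.mp hc with ⟨m, hm⟩
      cases p with
      | nil => simp at hp
      | cons ph pt =>
        have hph : ph = '<' := by simpa using hp
        have hpx : ph = x := by simpa using congrArg List.head? hm
        exact hx (by simp [← hpx, hph])
    rw [List.cons_append, pvPass_cons_neg _ _ _ _ hnp,
      ih (u' ++ k) (fun hm => hx (List.mem_cons_of_mem _ hm)) (List.prefix_append u' k)]
    simp

-- a '<'-free list is a prefix of (pvPass p r t) iff it is a prefix of t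
theorem prefix_pvPass_iff (p r : List Char) (hp : p.head? = some '<') (hr : r.head? = some '<') :
    ∀ t q, '<' ∉ q → (q <+: pvPass p r t ↔ q <+: t) := by
  have key : ∀ n (t : List Char), t.length ≤ n →
      ∀ q, '<' ∉ q → (q <+: pvPass p r t ↔ q <+: t) := by
    intro n
    induction n with
    | zero =>
      intro t ht q hq
      have : t = [] := List.length_eq_zero_iff.mp (Nat.le_zero.mp ht)
      subst this; rw [pvPass_nil]
    | succ n ih =>
      intro t ht q hq
      match t with
      | [] => rw [pvPass_nil]
      | c :: cs =>
        by_cases h : p.isPrefixOf (c :: cs) = true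
        · rw [pvPass_cons_pos _ _ _ _ h]
          match q with
          | [] => simp
          | y :: q' =>
            constructor
            · intro hpre
              cases r with
              | nil => simp at hr
              | cons rh rt =>
                have hrh : rh = '<' := by simpa using hr
                have : y = rh := (List.cons_prefix_cons.mp hpre).1
                exact absurd ((this.trans hrh) ▸ List.mem_cons_self) hq
            · intro hpre
              rcases List.isPrefixOf_iff_prefix.mp h with ⟨k, hk⟩
              cases p with
              | nil => simp at hp
              | cons ph pt =>
                have hph : ph = '<' := by simpa using hp
                have hc : c = ph := by simpa using (congrArg List.head? hk).symm
                have : y = c := (List.cons_prefix_cons.mp hpre).1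
                exact absurd ((this.trans (hc.trans hph)) ▸ List.mem_cons_self) hq
        · rw [pvPass_cons_neg _ _ _ _ h]
          match q with
          | [] => simp
          | y :: q' =>
            simp only [List.cons_prefix_cons]
            have hcs : cs.length ≤ n := by simp only [List.length_cons] at ht; omega
            have := ih cs hcs q' (fun hm => hq (List.mem_cons_of_mem _ hm))
            exact and_congr Iff.rfl this
  exact fun t q hq => key t.length t le_rfl q hq

theorem find?_congr_mem {α : Type} (f g : α → Bool) :
    ∀ (l : List α), (∀ a ∈ l, f a = g a) → l.find? f = l.find? g := by
  intro l
  induction l with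
  | nil => intro _; rfl
  | cons a l ih =>
    intro h
    by_cases hfa : f a = true
    · rw [List.find?_cons_of_pos hfa,
        List.find?_cons_of_pos (by rw [← h a List.mem_cons_self]; exact hfa)]
    · rw [List.find?_cons_of_neg hfa,
        List.find?_cons_of_neg (by rw [← h a List.mem_cons_self]; exact hfa),
        ih (fun a ha => h a (List.mem_cons_of_mem _ ha))]

-- scanning over a '<'-free block copies it
theorem pvScan_append_clean (R : List (List Char × List Char))
    (hR : ∀ q ∈ R, (q.1).head? = some '<') :
    ∀ u t, '<' ∉ u → pvScan R (u ++ t) = u ++ pvScan R t := by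
  intro u
  induction u with
  | nil => intro t _; simp
  | cons x u' ih =>
    intro t hx
    have hnone : R.find? (fun q => q.1.isPrefixOf (x :: (u' ++ t))) = none := by
      rw [List.find?_eq_none]
      intro q hq hc
      rcases List.isPrefixOf_iff_prefix.mp hc with ⟨k, hk⟩
      have hq1 := hR q hq
      cases hq1e : q.1 with
      | nil => rw [hq1e] at hq1; simp at hq1
      | cons qh qt =>
        rw [hq1e] at hq1 hk
        have hqh : qh = '<' := by simpa using hq1
        have : qh = x := by simpa using congrArg List.head? hk
        exact hx (by simp [← this, hqh])
    rw [List.cons_append, pvScan_cons_none R x (u' ++ t) hnone,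
      ih t (fun hm => hx (List.mem_cons_of_mem _ hm))]
    simp

-- scanning over an inserted longhand r (not extendable to any rule) copies it
theorem pvScan_append_rep (R : List (List Char × List Char)) (r : List Char)
    (hr : pvTag r) (hR : ∀ q ∈ R, pvTag q.1 ∧ ¬ q.1 <+: r ∧ ¬ r <+: q.1) :
    ∀ t, pvScan R (r ++ t) = r ++ pvScan R t := by
  intro t
  cases r with
  | nil => exact absurd hr.1 (by simp)
  | cons rh rt =>
    have hrh : rh = '<' := by simpa using hr.1
    subst hrh
    have hnone : R.find? (fun q => q.1.isPrefixOf ('<' :: (rt ++ t))) = none := by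
      rw [List.find?_eq_none]
      intro q hq hc
      have hpre : q.1 <+: ('<' :: rt) ++ t := by
        simpa using List.isPrefixOf_iff_prefix.mp hc
      rcases List.prefix_or_prefix_of_prefix hpre (List.prefix_append ('<' :: rt) t) with h1 | h1
      · exact (hR q hq).2.1 h1
      · exact (hR q hq).2.2 h1
    rw [List.cons_append, pvScan_cons_none R '<' (rt ++ t) hnone,
      pvScan_append_clean R (fun q hq => (hR q hq).1.1) rt t hr.2]
    simp

-- THE FUSION LEMMA: one replace pass followed by a scan with rules R
-- equals the scan with the pass's rule prepended to R.
theorem pvFuse (p r : List Char) (R : List (List Char × List Char))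
    (hp : pvTag p) (hr : pvTag r)
    (hR : ∀ q ∈ R, pvTag q.1 ∧ ¬ q.1 <+: r ∧ ¬ r <+: q.1) :
    ∀ s, pvScan R (pvPass p r s) = pvScan ((p, r) :: R) s := by
  have key : ∀ n (s : List Char), s.length ≤ n →
      pvScan R (pvPass p r s) = pvScan ((p, r) :: R) s := by
    intro n
    induction n with
    | zero =>
      intro s hs
      have : s = [] := List.length_eq_zero_iff.mp (Nat.le_zero.mp hs)
      subst this
      rw [pvPass_nil, pvScan_nilArg, pvScan_nilArg]
    | succ n ih =>
      intro s hs
      match s with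
      | [] => rw [pvPass_nil, pvScan_nilArg, pvScan_nilArg]
      | c :: cs =>
        have hcs : cs.length ≤ n := by simp only [List.length_cons] at hs; omega
        by_cases h : p.isPrefixOf (c :: cs) = true
        · -- the pass fires here; so does the head rule of the scan
          have hpne : p ≠ [] := by
            intro hpe; rw [hpe] at hp; exact absurd hp.1 (by simp)
          rw [pvPass_cons_pos _ _ _ _ h, pvScan_append_rep R r hr hR,
            pvScan_cons_some ((p, r) :: R) c cs p r (List.find?_cons_of_pos (by simpa using h)),
            ih (cs.drop (p.length - 1)) (by simp only [List.length_drop]; omega)]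
        · -- the pass copies c; matching in the passed tail = matching in the original tail
          rw [pvPass_cons_neg _ _ _ _ h]
          have hmatch : R.find? (fun q => q.1.isPrefixOf (c :: pvPass p r cs)) =
              R.find? (fun q => q.1.isPrefixOf (c :: cs)) := by
            apply find?_congr_mem
            intro q hq
            show q.1.isPrefixOf (c :: pvPass p r cs) = q.1.isPrefixOf (c :: cs)
            have hqt := (hR q hq).1
            cases hq1e : q.1 with
            | nil => rw [hq1e] at hqt; exact absurd hqt.1 (by simp)
            | cons qh w =>
              rw [hq1e] at hqt
              have hqh : qh = '<' := by simpa using hqt.1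
              subst hqh
              have hw : ('<' :: w).tail = w := rfl
              have hiff := prefix_pvPass_iff p r hp.1 hr.1 cs w (hw ▸ hqt.2)
              by_cases hcw : c = '<'
              · subst hcw
                rw [Bool.eq_iff_iff]
                simp only [List.isPrefixOf_iff_prefix, List.cons_prefix_cons]
                exact and_congr Iff.rfl hiff
              · have h1 : ('<' :: w).isPrefixOf (c :: pvPass p r cs) = false := by
                  rw [Bool.eq_false_iff]
                  intro hc2
                  exact hcw ((List.cons_prefix_cons.mp (List.isPrefixOf_iff_prefix.mp hc2)).1).symm
                have h2 : ('<' :: w).isPrefixOf (c :: cs) = false := by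
                  rw [Bool.eq_false_iff]
                  intro hc2
                  exact hcw ((List.cons_prefix_cons.mp (List.isPrefixOf_iff_prefix.mp hc2)).1).symm
                rw [h1, h2]
          match hfind : R.find? (fun q => q.1.isPrefixOf (c :: cs)) with
          | some (q, rq) =>
            -- some later rule matches at this position in both strings
            have hqmem : (q, rq) ∈ R := List.mem_of_find?_eq_some hfind
            have hqtag : pvTag q := by
              have := (hR _ hqmem).1
              simpa using this
            have hqpre : q <+: c :: cs := by
              have := List.find?_some hfind
              exact List.isPrefixOf_iff_prefix.mp this
            cases q with
            | nil => exact absurd hqtag.1 (by simp)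
            | cons qh w =>
              have hqh : qh = '<' := by simpa using hqtag.1
              subst hqh
              have hwpre : w <+: cs := (List.cons_prefix_cons.mp hqpre).2
              have hsplit := pvPass_clean_prefix p r hp.1 w cs hqtag.2 hwpre
              rw [pvScan_cons_some R c (pvPass p r cs) ('<' :: w) rq
                  (by rw [hmatch]; exact hfind),
                pvScan_cons_some ((p, r) :: R) c cs ('<' :: w) rq
                  (by rw [List.find?_cons_of_neg (by simpa using h)]; exact hfind),
                hsplit]
              have hwlen : ((w ++ pvPass p r (cs.drop w.length)).drop (('<' :: w).length - 1)) =
                  pvPass p r (cs.drop w.length) := by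
                simp
              rw [hwlen]
              have hdw : cs.drop (('<' :: w).length - 1) = cs.drop w.length := by simp
              rw [hdw, ih (cs.drop w.length) (by simp only [List.length_drop]; omega)]
          | none =>
            rw [pvScan_cons_none R c (pvPass p r cs) (by rw [hmatch]; exact hfind),
              pvScan_cons_none ((p, r) :: R) c cs
                (by rw [List.find?_cons_of_neg (by simpa using h)]; exact hfind),
              ih cs hcs]
  exact fun s => key s.length s le_rfl

-- iterated fusion: a chain of passes is one scan over the accumulated rule list
theorem pvChain_eq_scan :
    ∀ (R acc : List (List Char × List Char)), pvFuseCondB R acc = true →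
      ∀ s, pvScan acc (pvChain R s) = pvScan (R ++ acc) s := by
  intro R
  induction R with
  | nil => intro acc _ s; rfl
  | cons a R' ih =>
    match a with
    | (p, r) =>
      intro acc hc s
      simp only [pvFuseCondB, Bool.and_eq_true, List.all_eq_true] at hc
      obtain ⟨⟨⟨hp, hr⟩, hacc⟩, hrest⟩ := hc
      have hacc' : ∀ q ∈ R' ++ acc, pvTag q.1 ∧ ¬ q.1 <+: r ∧ ¬ r <+: q.1 := by
        intro q hq
        have := hacc q hq
        simp only [Bool.not_eq_true'] at this
        refine ⟨(pvTagB_iff q.1).mp this.1.1, ?_, ?_⟩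
        · rw [← List.isPrefixOf_iff_prefix]; simp [this.1.2]
        · rw [← List.isPrefixOf_iff_prefix]; simp [this.2]
      show pvScan acc (pvChain R' (pvPass p r s)) = _
      rw [ih acc hrest (pvPass p r s),
        pvFuse p r (R' ++ acc) ((pvTagB_iff p).mp hp) ((pvTagB_iff r).mp hr) hacc' s]
      rfl

-- A's 20 passes, written over List Char; the two identity <tdz> passes vanish
theorem portA_toList (message : String) :
    (transform_shorthand_tags message).toList = pvChain pvRules message.toList := by
  unfold transform_shorthand_tags
  simp only [pvMappings, List.foldl_cons, List.foldl_nil, PySem.Str.toList_replace,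
    pvRules, pvChain,
    show "<tz>".toList = '<'::'t'::'z'::'>' :: ([] : List Char) from rfl,
    show "</tz>".toList = '<'::'/'::'t'::'z'::'>' :: ([] : List Char) from rfl,
    show "<mm>".toList = '<'::'m'::'m'::'>' :: ([] : List Char) from rfl,
    show "</mm>".toList = '<'::'/'::'m'::'m'::'>' :: ([] : List Char) from rfl,
    show "<id>".toList = '<'::'i'::'d'::'>' :: ([] : List Char) from rfl,
    show "</id>".toList = '<'::'/'::'i'::'d'::'>' :: ([] : List Char) from rfl,
    show "<ch>".toList = '<'::'c'::'h'::'>' :: ([] : List Char) from rfl,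
    show "</ch>".toList = '<'::'/'::'c'::'h'::'>' :: ([] : List Char) from rfl,
    show "<fe>".toList = '<'::'f'::'e'::'>' :: ([] : List Char) from rfl,
    show "</fe>".toList = '<'::'/'::'f'::'e'::'>' :: ([] : List Char) from rfl,
    show "<tn>".toList = '<'::'t'::'n'::'>' :: ([] : List Char) from rfl,
    show "</tn>".toList = '<'::'/'::'t'::'n'::'>' :: ([] : List Char) from rfl,
    show "<er>".toList = '<'::'e'::'r'::'>' :: ([] : List Char) from rfl,
    show "</er>".toList = '<'::'/'::'e'::'r'::'>' :: ([] : List Char) from rfl,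
    show "<sm>".toList = '<'::'s'::'m'::'>' :: ([] : List Char) from rfl,
    show "</sm>".toList = '<'::'/'::'s'::'m'::'>' :: ([] : List Char) from rfl,
    show "<rd>".toList = '<'::'r'::'d'::'>' :: ([] : List Char) from rfl,
    show "</rd>".toList = '<'::'/'::'r'::'d'::'>' :: ([] : List Char) from rfl,
    show "<tdz>".toList = '<'::'t'::'d'::'z'::'>' :: ([] : List Char) from rfl,
    show "</tdz>".toList = '<'::'/'::'t'::'d'::'z'::'>' :: ([] : List Char) from rfl,
    replace_cons_eq_pass, pvPass_id]

-- ===== VERDICT (by name: the statement is the Claim_ definition above) =====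
theorem transform_shorthand_tags_spec : Claim_equal_transform_shorthand_tags := by
  intro message _
  show transform_shorthand_tags message = transform_shorthand_tags_alt message
  have h1 : (transform_shorthand_tags message).toList = pvScan pvRules message.toList := by
    rw [portA_toList, ← pvScan_nil (pvChain pvRules message.toList),
      pvChain_eq_scan pvRules [] (by decide) message.toList, List.append_nil]
  calc transform_shorthand_tags message
      = String.ofList (transform_shorthand_tags message).toList := String.ofList_toList.symm
    _ = transform_shorthand_tags_alt message := by rw [h1]; rfl
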